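-- pv_equiv track=rewrite | github.com/dx2331lxz/openwps | server/app/workspace.py | _detect_extension
-- ===== SOURCE A (Python) =====
-- ALLOWED_EXTENSIONS = {".docx", ".txt", ".md", ".pdf", ".ppt", ".pptx", ".markdown"}
--
-- MIME_MAP = {
--     "application/vnd.openxmlformats-officedocument.wordprocessingml.document": ".docx",
--     "application/vnd.openxmlformats-officedocument.presentationml.presentation": ".pptx",
--     "application/vnd.ms-powerpoint": ".ppt",
--     "application/pdf": ".pdf",
--     "text/plain": ".txt",
--     "text/markdown": ".md",
-- }
--
-- def _detect_extension(filename: str, content_type: str = "") -> str: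
--     ct = (content_type or "").strip().lower()
--     if ct in MIME_MAP:
--         return MIME_MAP[ct]
--     name_lower = filename.lower()
--     for ext in sorted(ALLOWED_EXTENSIONS, key=len, reverse=True):
--         if name_lower.endswith(ext):
--             return ext
--     return ""
-- ===== SOURCE B (Python) =====
-- ALLOWED_EXTENSIONS = {".docx", ".txt", ".md", ".pdf", ".ppt", ".pptx", ".markdown"}
--
-- MIME_MAP = {
--     "application/vnd.openxmlformats-officedocument.wordprocessingml.document": ".docx",
--     "application/vnd.openxmlformats-officedocument.presentationml.presentation": ".pptx",
--     "application/vnd.ms-powerpoint": ".ppt",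
--     "application/pdf": ".pdf",
--     "text/plain": ".txt",
--     "text/markdown": ".md",
-- }
--
-- def _detect_extension(filename: str, content_type: str = "") -> str:
--     ct = (content_type or "").strip().lower()
--     if ct in MIME_MAP:
--         return MIME_MAP[ct]
--     name = filename.lower()
--     if "." in name:
--         ext = "." + name.rsplit(".", 1)[-1]
--         return ext if ext in ALLOWED_EXTENSIONS else ""
--     return ""
-- ===== Notes on version B (the rewrite author's own statement) =====
-- stated objective: simpler
-- what changed: Instead of scanning the length-sorted allowed extensions and testing endswith for each, B extracts the single suffix after the last dot and does one set-membership test (safe because no allowed extension is a suffix of another).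
import Mathlib
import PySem

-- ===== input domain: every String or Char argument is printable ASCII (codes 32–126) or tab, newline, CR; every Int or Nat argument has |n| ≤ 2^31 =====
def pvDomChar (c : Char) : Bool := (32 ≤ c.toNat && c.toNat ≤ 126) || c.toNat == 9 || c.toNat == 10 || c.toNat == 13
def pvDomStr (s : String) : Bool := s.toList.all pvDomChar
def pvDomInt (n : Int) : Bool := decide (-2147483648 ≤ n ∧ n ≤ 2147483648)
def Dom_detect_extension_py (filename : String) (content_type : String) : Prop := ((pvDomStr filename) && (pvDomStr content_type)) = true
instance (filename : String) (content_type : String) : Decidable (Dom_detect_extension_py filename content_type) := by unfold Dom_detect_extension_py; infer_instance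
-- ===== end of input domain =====

-- B replaces A's scan over the length-sorted allowed extensions by extracting the suffix after the
-- last dot once and testing it for membership (simpler; exact because no allowed extension is a
-- suffix of another).

-- ===== PORT A =====
-- module constants shared by both versions
def pvAllowed : List String :=
  PySem.Set.ofList [".docx", ".txt", ".md", ".pdf", ".ppt", ".pptx", ".markdown"]

def pvMime : PySem.Dict String String :=
  PySem.Dict.ofList
    [("application/vnd.openxmlformats-officedocument.wordprocessingml.document", ".docx"),
     ("application/vnd.openxmlformats-officedocument.presentationml.presentation", ".pptx"),
     ("application/vnd.ms-powerpoint", ".ppt"),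
     ("application/pdf", ".pdf"),
     ("text/plain", ".txt"),
     ("text/markdown", ".md")]

-- the 'for ext in …: if name_lower.endswith(ext): return ext' loop
def pvLoopA (name : String) : List String → String
  | [] => ""
  | e :: rest => if PySem.Str.endswith name e then e else pvLoopA name rest

def detect_extension_py (filename : String) (content_type : String) : String :=
  let ct := PySem.Str.lower (PySem.Str.strip (if content_type ≠ "" then content_type else ""))
  match PySem.Dict.get? pvMime ct with
  | some v => v
  | none =>
    let name_lower := PySem.Str.lower filename
    pvLoopA name_lower (PySem.List.sorted pvAllowed (fun e => PySem.Str.len e) true)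

-- ===== PORT B =====
-- hand port of name.rsplit(".", 1)[-1] (PySem has no rsplit): the segment after the LAST '.';
-- exact for strings containing '.', the only case B uses it in.
def pvLastSeg (cs : List Char) : List Char :=
  (cs.reverse.takeWhile (fun c => c != '.')).reverse

def detect_extension_py_alt (filename : String) (content_type : String) : String :=
  let ct := PySem.Str.lower (PySem.Str.strip (if content_type ≠ "" then content_type else ""))
  match PySem.Dict.get? pvMime ct with
  | some v => v
  | none =>
    let name := PySem.Str.lower filename
    if PySem.Str.isIn "." name then
      let ext := String.ofList ('.' :: pvLastSeg name.toList)
      if pvAllowed.contains ext then ext else ""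
    else ""

-- ===== PRECONDITION & SPEC =====
def Spec_detect_extension_py (filename : String) (content_type : String) (out : String) : Prop := out = detect_extension_py_alt filename content_type
instance (filename : String) (content_type : String) (out : String) : Decidable (Spec_detect_extension_py filename content_type out) := by unfold Spec_detect_extension_py; infer_instance

-- ===== CLAIM (what is proved, stated in full; the proofs are below) =====
def Claim_equal_detect_extension_py : Prop := ∀ (filename : String) (content_type : String), Dom_detect_extension_py filename content_type → Spec_detect_extension_py filename content_type (detect_extension_py filename content_type)

-- ===== LEMMAS AND PROOFS =====

-- if '.'::body is a suffix of s and body is dot-free, the last segment of s is exactly body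
lemma pvLastSeg_of_suffix (s body : List Char) (hsuf : ('.' :: body) <:+ s)
    (hb : ∀ c ∈ body, c ≠ '.') : pvLastSeg s = body := by
  obtain ⟨pre, rfl⟩ := hsuf
  unfold pvLastSeg
  rw [List.reverse_append, List.reverse_cons, List.append_assoc]
  rw [List.takeWhile_append_of_pos (by intro a ha; simp [hb a (List.mem_reverse.mp ha)])]
  simp

-- if s contains a dot, '.' :: (last segment) is a suffix of s
lemma pvLastSeg_suffix (s : List Char) (h : '.' ∈ s) : ('.' :: pvLastSeg s) <:+ s := by
  set r := s.reverse with hr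
  have hmem : '.' ∈ r := by simpa [hr] using h
  have hne : r.dropWhile (fun c => c != '.') ≠ [] := by
    intro hnil
    have : ∀ c ∈ r, (fun c => c != '.') c = true := by
      intro c hc
      have := List.dropWhile_eq_nil_iff (l := r) (p := (fun c => c != '.'))
      rw [hnil] at this
      exact (this.mp rfl) c hc
    simpa using this '.' hmem
  have hhead : ((r.dropWhile (fun c => c != '.')).head hne) = '.' := by
    have := List.head_dropWhile_not (fun c => c != '.') hne
    simpa using this
  have hsplit : r = r.takeWhile (fun c => c != '.') ++
      ('.' :: (r.dropWhile (fun c => c != '.')).tail) := by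
    conv_lhs => rw [← List.takeWhile_append_dropWhile (p := (fun c => c != '.')) (l := r)]
    congr 1
    have h2 := List.cons_head_tail hne
    rw [hhead] at h2
    exact h2.symm
  refine ⟨((r.dropWhile (fun c => c != '.')).tail).reverse, ?_⟩
  have : s = r.reverse := by simp [hr]
  rw [this]
  conv_rhs => rw [hsplit]
  simp [pvLastSeg, hr]

-- the characterisation: for dot-free body, '.'::body is a suffix of s iff the last segment is body
lemma pvSuffix_iff (s body : List Char) (hdot : '.' ∈ s) (hb : ∀ c ∈ body, c ≠ '.') :
    (('.' :: body) <:+ s) ↔ pvLastSeg s = body := by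
  constructor
  · intro h; exact pvLastSeg_of_suffix s body h hb
  · intro h; rw [← h]; exact pvLastSeg_suffix s hdot

-- dot-freeness of a literal body, via a decidable Bool check
lemma pvNoDot (t : String) (h : (t.toList.all (fun c => c != '.')) = true) :
    ∀ c ∈ t.toList, c ≠ '.' := by
  intro c hc; simpa using List.all_eq_true.mp h c hc

-- String.ofList equality with a literal
lemma pvOfList_eq (l : List Char) (t : String) : String.ofList l = t ↔ l = t.toList := by
  constructor
  · intro h; have := congrArg String.toList h; simpa using this
  · intro h; subst h; simp

-- the loop over the length-sorted extensions equals B's single extraction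
set_option maxRecDepth 8192 in
lemma pvCore (name : String) :
    pvLoopA name (PySem.List.sorted pvAllowed (fun e => PySem.Str.len e) true) =
      (if PySem.Str.isIn "." name then
        (if pvAllowed.contains (String.ofList ('.' :: pvLastSeg name.toList)) then
          String.ofList ('.' :: pvLastSeg name.toList) else "")
      else "") := by
  have hsorted : PySem.List.sorted pvAllowed (fun e => PySem.Str.len e) true =
      [".markdown", ".docx", ".pptx", ".txt", ".pdf", ".ppt", ".md"] := by decide
  rw [hsorted]
  set s := name.toList with hs
  by_cases hdot : '.' ∈ s
  · have hin : PySem.Str.isIn "." name = true := by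
      rw [PySem.Str.isIn_iff_infix]
      exact (List.singleton_infix_iff '.' s).mpr hdot
    rw [if_pos hin]
    have hend : ∀ (e : String) (body : List Char), e.toList = '.' :: body →
        (∀ c ∈ body, c ≠ '.') →
        (PySem.Str.endswith name e = (pvLastSeg s == body)) := by
      intro e body he hb
      have : PySem.Str.endswith name e = true ↔ pvLastSeg s = body := by
        rw [PySem.Str.endswith_eq, PySem.Chars.endswith_iff, ← hs, he]
        exact pvSuffix_iff s body hdot hb
      rw [Bool.eq_iff_iff, beq_iff_eq]; exact this
    simp only [pvLoopA]
    rw [hend ".markdown" "markdown".toList (by decide) (pvNoDot _ (by decide)),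
        hend ".docx" "docx".toList (by decide) (pvNoDot _ (by decide)),
        hend ".pptx" "pptx".toList (by decide) (pvNoDot _ (by decide)),
        hend ".txt" "txt".toList (by decide) (pvNoDot _ (by decide)),
        hend ".pdf" "pdf".toList (by decide) (pvNoDot _ (by decide)),
        hend ".ppt" "ppt".toList (by decide) (pvNoDot _ (by decide)),
        hend ".md" "md".toList (by decide) (pvNoDot _ (by decide))]
    set t := pvLastSeg s with ht
    by_cases h1 : t = ['m','a','r','k','d','o','w','n']
    · rw [h1]; decide
    · by_cases h2 : t = ['d','o','c','x']
      · rw [h2]; decide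
      · by_cases h3 : t = ['p','p','t','x']
        · rw [h3]; decide
        · by_cases h4 : t = ['t','x','t']
          · rw [h4]; decide
          · by_cases h5 : t = ['p','d','f']
            · rw [h5]; decide
            · by_cases h6 : t = ['p','p','t']
              · rw [h6]; decide
              · by_cases h7 : t = ['m','d']
                · rw [h7]; decide
                · have hcf : String.ofList ('.' :: t) ∉ pvAllowed := by
                    intro hc
                    have hA : pvAllowed =
                        [".docx", ".txt", ".md", ".pdf", ".ppt", ".pptx", ".markdown"] := by decide
                    rw [hA] at hc
                    simp [pvOfList_eq] at hc
                    rcases hc with h|h|h|h|h|h|h <;> simp_all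
                  simp [hcf, h1, h2, h3, h4, h5, h6, h7]
  · have hin : PySem.Str.isIn "." name = false := by
      simp only [PySem.Str.isIn_eq]
      rw [PySem.Chars.isIn_eq_false_iff]
      intro hcontra
      exact hdot ((List.singleton_infix_iff '.' (name.toList)).mp (by simpa using hcontra))
    rw [if_neg (by rw [hin]; simp)]
    have hnoend : ∀ (e : String), '.' ∈ e.toList → PySem.Str.endswith name e = false := by
      intro e he
      by_contra hc
      simp only [Bool.not_eq_false] at hc
      rw [PySem.Str.endswith_eq, PySem.Chars.endswith_iff] at hc
      exact hdot (hc.subset he)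
    simp only [pvLoopA]
    rw [hnoend ".markdown" (by decide), hnoend ".docx" (by decide), hnoend ".pptx" (by decide),
        hnoend ".txt" (by decide), hnoend ".pdf" (by decide), hnoend ".ppt" (by decide),
        hnoend ".md" (by decide)]
    simp

-- ===== VERDICT (by name: the statement is the Claim_ definition above) =====
theorem detect_extension_py_spec : Claim_equal_detect_extension_py := by
  intro filename content_type _
  show detect_extension_py filename content_type = detect_extension_py_alt filename content_type
  simp only [detect_extension_py, detect_extension_py_alt]
  cases hq : PySem.Dict.get? pvMime
      (PySem.Str.lower (PySem.Str.strip (if content_type ≠ "" then content_type else ""))) with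
  | some v => rfl
  | none => exact pvCore (PySem.Str.lower filename)
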